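-- pv_equiv track=rewrite | github.com/chyyuu/cargotree2mermaid | nodedeps.py | collect_upstream_deps
-- ===== SOURCE A (Python) =====
-- def collect_upstream_deps(node_id, edges, nodes, max_level=None):
--     """Collect upstream dependencies (nodes that depend on this node)
--
--     Args:
--         node_id: Starting node ID
--         edges: List of (parent, child) edges
--         nodes: Dict of node_id -> label
--         max_level: Maximum depth level (None for unlimited)
--     """
--     upstream = set()
--     visited = set()
--     queue = [(node_id, 0)]  # (node_id, level)
--
--     while queue:
--         current, level = queue.pop(0)
--         if current in visited:
--             continue
--         visited.add(current)
--
--         # Find parents of current node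
--         for parent, child in edges:
--             if child == current and parent not in visited:
--                 # Check if we've exceeded max level
--                 if max_level is None or level + 1 <= max_level:
--                     upstream.add(parent)
--                     queue.append((parent, level + 1))
--
--     return upstream
-- ===== SOURCE B (Python) =====
-- def collect_upstream_deps(node_id, edges, nodes, max_level=None):
--     """Level-synchronous BFS over a child->parents index built once, instead of
--     rescanning the whole edge list for every dequeued node."""
--     parents = {}
--     for p, c in edges:
--         parents.setdefault(c, []).append(p)
--     seen = {node_id}
--     upstream = set()
--     frontier = [node_id]
--     level = 0
--     while frontier and (max_level is None or level < max_level):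
--         nxt = []
--         for v in frontier:
--             for p in parents.get(v, []):
--                 if p not in seen:
--                     seen.add(p)
--                     upstream.add(p)
--                     nxt.append(p)
--         frontier = nxt
--         level += 1
--     return upstream
-- ===== Notes on version B (the rewrite author's own statement) =====
-- stated objective: alternative
-- what changed: B precomputes a child->parents adjacency dict in one pass over the edges and runs a level-synchronous frontier BFS over it, instead of A's queue loop that rescans the whole edge list for every dequeued node.
import Mathlib
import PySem

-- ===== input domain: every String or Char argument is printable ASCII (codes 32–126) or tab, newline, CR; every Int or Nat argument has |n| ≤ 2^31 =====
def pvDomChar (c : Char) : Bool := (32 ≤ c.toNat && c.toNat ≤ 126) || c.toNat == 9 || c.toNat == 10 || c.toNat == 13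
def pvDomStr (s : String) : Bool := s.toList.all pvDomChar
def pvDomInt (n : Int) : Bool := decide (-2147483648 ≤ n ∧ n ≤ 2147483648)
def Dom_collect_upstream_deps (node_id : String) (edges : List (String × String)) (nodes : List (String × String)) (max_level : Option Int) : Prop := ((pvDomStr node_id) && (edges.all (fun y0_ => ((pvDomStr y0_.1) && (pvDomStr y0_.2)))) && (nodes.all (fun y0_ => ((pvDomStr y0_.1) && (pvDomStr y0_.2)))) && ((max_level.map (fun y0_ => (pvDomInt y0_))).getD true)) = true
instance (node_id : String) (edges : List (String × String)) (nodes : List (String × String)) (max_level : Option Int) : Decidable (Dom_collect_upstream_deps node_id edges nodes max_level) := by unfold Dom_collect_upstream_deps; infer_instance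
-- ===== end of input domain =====

-- B replaces A's per-dequeued-node rescan of the whole edge list by a child→parents index
-- built once and a level-synchronous frontier BFS (objective: alternative algorithm).

-- ===== PORT A =====
-- fuel: an upper bound on the number of 'while queue' iterations (pops); a pure totality
-- guard — the proofs show it is never exhausted, so it changes no computed value.
def pvFuel (edges : List (String × String)) : Nat := edges.length + 2

-- one step of A's inner 'for parent, child in edges' loop
def aInner (ml : Option Int) (current : String) (level : Int) (visited : PySem.Set String)
    (st : PySem.Set String × List (String × Int)) (pc : String × String) :
    PySem.Set String × List (String × Int) :=
  if pc.2 == current && !(PySem.Set.contains visited pc.1) then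
    if (match ml with | none => true | some m => decide (level + 1 ≤ m)) then
      (PySem.Set.add st.1 pc.1, st.2 ++ [(pc.1, level + 1)])
    else st
  else st

-- A's 'while queue' loop: pop front, skip visited, scan all edges for parents
def aLoop (edges : List (String × String)) (ml : Option Int) :
    Nat → PySem.Set String → PySem.Set String → List (String × Int) → List String
  | 0, upstream, _, _ => upstream
  | _ + 1, upstream, _, [] => upstream
  | fuel + 1, upstream, visited, (current, level) :: rest =>
    if PySem.Set.contains visited current then aLoop edges ml fuel upstream visited rest
    else
      let visited' := PySem.Set.add visited current
      let st := edges.foldl (aInner ml current level visited') (upstream, rest)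
      aLoop edges ml fuel st.1 visited' st.2

def collect_upstream_deps (node_id : String) (edges : List (String × String)) (nodes : List (String × String)) (max_level : Option Int) : List String :=
  aLoop edges max_level (pvFuel edges) PySem.Set.empty PySem.Set.empty [(node_id, 0)]

-- ===== PORT B =====
-- parents: child -> list of parents, built once ('parents.setdefault(c, []).append(p)')
def bAdj (edges : List (String × String)) : PySem.Dict String (List String) :=
  edges.foldl (fun d pc => d.modify pc.2 [] (fun l => l ++ [pc.1])) PySem.Dict.empty

-- body of B's innermost loop: 'if p not in seen: seen.add(p); upstream.add(p); nxt.append(p)'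
-- state = (seen, upstream, nxt)
def bIns (st : PySem.Set String × PySem.Set String × List String) (p : String) :
    PySem.Set String × PySem.Set String × List String :=
  if PySem.Set.contains st.1 p then st
  else (PySem.Set.add st.1 p, PySem.Set.add st.2.1 p, st.2.2 ++ [p])

-- 'for p in parents.get(v, []): …'
def bNode (adj : PySem.Dict String (List String))
    (st : PySem.Set String × PySem.Set String × List String) (v : String) :
    PySem.Set String × PySem.Set String × List String :=
  (adj.getD v []).foldl bIns st

-- B's 'while frontier and (max_level is None or level < max_level)' loop
def bLoop (adj : PySem.Dict String (List String)) (ml : Option Int) :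
    Nat → Int → PySem.Set String → PySem.Set String → List String → List String
  | 0, _, _, upstream, _ => upstream
  | _ + 1, _, _, upstream, [] => upstream
  | fuel + 1, level, seen, upstream, v :: fr =>
    if (match ml with | none => false | some m => decide (¬ level < m)) then upstream
    else
      let st := (v :: fr).foldl (bNode adj) (seen, upstream, [])
      bLoop adj ml fuel (level + 1) st.1 st.2.1 st.2.2

def collect_upstream_deps_alt (node_id : String) (edges : List (String × String)) (nodes : List (String × String)) (max_level : Option Int) : List String :=
  bLoop (bAdj edges) max_level (pvFuel edges) 0
    (PySem.Set.add PySem.Set.empty node_id) PySem.Set.empty [node_id]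

-- ===== PRECONDITION & SPEC =====
def Spec_collect_upstream_deps (node_id : String) (edges : List (String × String)) (nodes : List (String × String)) (max_level : Option Int) (out : List String) : Prop := out = collect_upstream_deps_alt node_id edges nodes max_level
instance (node_id : String) (edges : List (String × String)) (nodes : List (String × String)) (max_level : Option Int) (out : List String) : Decidable (Spec_collect_upstream_deps node_id edges nodes max_level out) := by unfold Spec_collect_upstream_deps; infer_instance

-- ===== CLAIM (what is proved, stated in full; the proofs are below) =====
def Claim_equal_collect_upstream_deps : Prop := ∀ (node_id : String) (edges : List (String × String)) (nodes : List (String × String)) (max_level : Option Int), Dom_collect_upstream_deps node_id edges nodes max_level → Spec_collect_upstream_deps node_id edges nodes max_level (collect_upstream_deps node_id edges nodes max_level)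

-- ===== LEMMAS AND PROOFS =====

-- dedup-keep-first of the elements not in s (the frontier A actually processes out of a
-- queue segment, and the nodes B admits into the next frontier)
def ddf (s : PySem.Set String) : List String → List String
  | [] => []
  | x :: xs => if PySem.Set.contains s x then ddf s xs else x :: ddf (PySem.Set.add s x) xs

-- number of edges whose child is not yet visited (the fuel potential)
def pvF (edges : List (String × String)) (V : PySem.Set String) : Nat :=
  edges.countP (fun e => !(PySem.Set.contains V e.2))

-- A's processing of one whole BFS level: the queue segment Qd is consumed entry by entry,
-- enqueued entries are collected in acc (state = (upstream, visited, acc))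
def lvlA (edges : List (String × String)) (ml : Option Int) :
    PySem.Set String × PySem.Set String × List (String × Int) → List (String × Int) →
    PySem.Set String × PySem.Set String × List (String × Int)
  | st, [] => st
  | (U, V, acc), (c, l) :: rest =>
    if PySem.Set.contains V c then lvlA edges ml (U, V, acc) rest
    else
      let V' := PySem.Set.add V c
      let st2 := edges.foldl (aInner ml c l V') (U, acc)
      lvlA edges ml (st2.1, V', st2.2) rest

-- adjacency lookup = parents of c in edge order
lemma bAdj_getD (edges : List (String × String)) (c : String) :
    (bAdj edges).getD c [] = (edges.filter (fun pc => pc.2 == c)).map (·.1) := by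
  have h : bAdj edges
      = (edges.map Prod.swap).foldl (fun d p => d.modify p.1 [] (fun l => l ++ [p.2])) PySem.Dict.empty := by
    rw [List.foldl_map]; rfl
  rw [h, PySem.Dict.getD_foldl_modify_append]
  simp [List.filter_map, Function.comp_def, Prod.swap]

-- bNode as a single scan of the edge list
lemma bNode_eq (edges : List (String × String)) (st : PySem.Set String × PySem.Set String × List String) (c : String) :
    bNode (bAdj edges) st c
      = edges.foldl (fun st e => if e.2 == c then bIns st e.1 else st) st := by
  rw [bNode, bAdj_getD, List.foldl_map,
    PySem.List.foldl_if_eq_foldl_filter (p := fun e : String × String => e.2 == c)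
      (f := fun st e => bIns st e.1)]

-- ddf facts
lemma ddf_congr (s s' : PySem.Set String) (h : ∀ x, x ∈ s ↔ x ∈ s') :
    ∀ xs, ddf s xs = ddf s' xs := by
  intro xs
  induction xs generalizing s s' with
  | nil => rfl
  | cons x xs ih =>
    have hc : PySem.Set.contains s x = PySem.Set.contains s' x := by
      by_cases hx : x ∈ s
      · rw [(PySem.Set.contains_iff _ _).2 hx, (PySem.Set.contains_iff _ _).2 ((h x).1 hx)]
      · have hx' : x ∉ s' := fun hh => hx ((h x).2 hh)
        rw [Bool.eq_iff_iff, PySem.Set.contains_iff, PySem.Set.contains_iff]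
        exact iff_of_false hx hx'
    simp only [ddf, hc]
    by_cases hx : PySem.Set.contains s' x = true
    · simp only [hx, if_true]
      exact ih s s' h
    · simp only [hx, Bool.false_eq_true, if_false]
      refine congrArg _ (ih _ _ ?_)
      intro y
      simp [PySem.Set.mem_add, h y]

lemma ddf_subset (s : PySem.Set String) (xs : List String) : ∀ x ∈ ddf s xs, x ∈ xs := by
  induction xs generalizing s with
  | nil => simp [ddf]
  | cons x xs ih =>
    intro y hy
    simp only [ddf] at hy
    split at hy
    · exact List.mem_cons_of_mem _ (ih s y hy)
    · rcases List.mem_cons.1 hy with h | h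
      · simp [h]
      · exact List.mem_cons_of_mem _ (ih _ y h)

lemma ddf_length_le (s : PySem.Set String) (xs : List String) : (ddf s xs).length ≤ xs.length := by
  induction xs generalizing s with
  | nil => simp [ddf]
  | cons x xs ih =>
    simp only [ddf]
    split
    · exact Nat.le_succ_of_le (ih s)
    · simpa using Nat.succ_le_succ (ih _)

lemma ddf_eq_nil (s : PySem.Set String) (xs : List String) (h : ddf s xs = []) : ∀ x ∈ xs, x ∈ s := by
  induction xs generalizing s with
  | nil => simp
  | cons x xs ih =>
    simp only [ddf] at h
    split at h
    · rename_i hc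
      intro y hy
      rcases List.mem_cons.1 hy with rfl | hy
      · exact (PySem.Set.contains_iff _ _).1 hc
      · exact ih s h y hy
    · simp at h

lemma ddf_snoc (s : PySem.Set String) (xs : List String) (a : String) :
    ddf s (xs ++ [a]) = if a ∈ s ∨ a ∈ ddf s xs then ddf s xs else ddf s xs ++ [a] := by
  induction xs generalizing s with
  | nil =>
    simp only [List.nil_append, ddf]
    by_cases ha : a ∈ s
    · simp [(PySem.Set.contains_iff _ _).2 ha, ha]
    · have : PySem.Set.contains s a = false := by
        rw [Bool.eq_false_iff]; intro hh; exact ha ((PySem.Set.contains_iff _ _).1 hh)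
      simp [this, ha, ddf]
  | cons x xs ih =>
    simp only [List.cons_append, ddf]
    by_cases hx : PySem.Set.contains s x = true
    · simp only [hx, if_true]
      exact ih s
    · simp only [hx, Bool.false_eq_true, if_false]
      rw [ih (PySem.Set.add s x)]
      have hmem : (a ∈ PySem.Set.add s x ∨ a ∈ ddf (PySem.Set.add s x) xs)
          ↔ (a ∈ s ∨ a ∈ x :: ddf (PySem.Set.add s x) xs) := by
        simp only [PySem.Set.mem_add, List.mem_cons]
        tauto
      by_cases hcond : a ∈ s ∨ a ∈ x :: ddf (PySem.Set.add s x) xs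
      · rw [if_pos (hmem.2 hcond), if_pos hcond]
      · rw [if_neg (fun hh => hcond (hmem.1 hh)), if_neg hcond]
        simp

-- the counting step of the fuel potential
lemma pvF_add (edges : List (String × String)) (V : PySem.Set String) (c : String) (hc : c ∉ V) :
    pvF edges V = pvF edges (PySem.Set.add V c) + edges.countP (fun e => e.2 == c) := by
  induction edges with
  | nil => simp [pvF]
  | cons e es ih =>
    simp only [pvF, List.countP_cons] at ih ⊢
    by_cases h2 : e.2 = c
    · have h1 : PySem.Set.contains V e.2 = false := by
        rw [Bool.eq_false_iff]
        intro hh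
        exact hc (h2 ▸ (PySem.Set.contains_iff _ _).1 hh)
      have h3 : PySem.Set.contains (PySem.Set.add V c) e.2 = true := by
        rw [PySem.Set.contains_iff, PySem.Set.mem_add]
        exact Or.inr h2
      have h4 : (e.2 == c) = true := beq_iff_eq.2 h2
      simp only [h1, h3, h4, Bool.not_false, Bool.not_true, if_true, Bool.false_eq_true, if_false]
      omega
    · have h3 : PySem.Set.contains (PySem.Set.add V c) e.2 = PySem.Set.contains V e.2 := by
        rw [Bool.eq_iff_iff, PySem.Set.contains_iff, PySem.Set.contains_iff, PySem.Set.mem_add]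
        exact ⟨fun h => h.elim id (fun hh => absurd hh h2), Or.inl⟩
      have h4 : (e.2 == c) = false := by simp [h2]
      simp only [h3, h4, Bool.false_eq_true, if_false]
      cases hV : PySem.Set.contains V e.2 <;>
        simp only [hV, Bool.not_false, Bool.not_true, if_true, Bool.false_eq_true, if_false] <;> omega

-- A's inner scan never reads the queue it appends to
lemma aInner_foldl_decomp (ml : Option Int) (c : String) (l : Int) (V' : PySem.Set String) :
    ∀ (es : List (String × String)) (U : PySem.Set String) (X Y : List (String × Int)),
      es.foldl (aInner ml c l V') (U, X ++ Y)
        = ((es.foldl (aInner ml c l V') (U, Y)).1, X ++ (es.foldl (aInner ml c l V') (U, Y)).2) := by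
  intro es
  induction es with
  | nil => intro U X Y; rfl
  | cons e es ih =>
    intro U X Y
    simp only [List.foldl_cons]
    have hstep : aInner ml c l V' (U, X ++ Y) e
        = ((aInner ml c l V' (U, Y) e).1, X ++ (aInner ml c l V' (U, Y) e).2) := by
      simp only [aInner]
      split_ifs <;> simp
    rw [hstep]
    have := ih (aInner ml c l V' (U, Y) e).1 X (aInner ml c l V' (U, Y) e).2
    simpa using this

-- A consumes one fuel per pop: a whole level is lvlA
lemma aLoop_level (edges : List (String × String)) (ml : Option Int) :
    ∀ (Qd : List (String × Int)) (f : Nat) (U V : PySem.Set String) (acc : List (String × Int)),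
      aLoop edges ml (Qd.length + f) U V (Qd ++ acc)
        = aLoop edges ml f (lvlA edges ml (U, V, acc) Qd).1
            (lvlA edges ml (U, V, acc) Qd).2.1 (lvlA edges ml (U, V, acc) Qd).2.2 := by
  intro Qd
  induction Qd with
  | nil => intro f U V acc; simp [lvlA]
  | cons e rest ih =>
    obtain ⟨c, l⟩ := e
    intro f U V acc
    have hlen : ((c, l) :: rest).length + f = (rest.length + f) + 1 := by
      simp [List.length_cons]; omega
    rw [hlen]
    show aLoop edges ml ((rest.length + f) + 1) U V ((c, l) :: (rest ++ acc)) = _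
    by_cases hv : PySem.Set.contains V c = true
    · rw [show aLoop edges ml ((rest.length + f) + 1) U V ((c, l) :: (rest ++ acc))
            = aLoop edges ml (rest.length + f) U V (rest ++ acc) by
          simp only [aLoop, hv, if_true]]
      rw [ih f U V acc]
      simp only [lvlA, hv, if_true]
    · rw [show aLoop edges ml ((rest.length + f) + 1) U V ((c, l) :: (rest ++ acc))
            = aLoop edges ml (rest.length + f)
                (edges.foldl (aInner ml c l (PySem.Set.add V c)) (U, rest ++ acc)).1
                (PySem.Set.add V c)
                (edges.foldl (aInner ml c l (PySem.Set.add V c)) (U, rest ++ acc)).2 by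
          simp only [aLoop, hv, Bool.false_eq_true, if_false]]
      rw [aInner_foldl_decomp ml c l (PySem.Set.add V c) edges U rest acc]
      rw [ih f _ _ _]
      simp only [lvlA, hv, Bool.false_eq_true, if_false]

-- a queue of visited nodes is drained without effect
lemma aLoop_skip_all (edges : List (String × String)) (ml : Option Int) :
    ∀ (Qd : List (String × Int)) (f : Nat) (U V : PySem.Set String),
      (∀ e ∈ Qd, e.1 ∈ V) → aLoop edges ml f U V Qd = U := by
  intro Qd
  induction Qd with
  | nil => intro f U V _; cases f <;> rfl
  | cons e rest ih =>
    intro f U V h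
    obtain ⟨c, l⟩ := e
    cases f with
    | zero => rfl
    | succ f =>
      have hc : PySem.Set.contains V c = true :=
        (PySem.Set.contains_iff _ _).2 (h (c, l) (by simp))
      simp only [aLoop, hc, if_true]
      exact ih f U V (fun e he => h e (List.mem_cons_of_mem _ he))

-- past max_level the whole queue drains without effect
lemma aLoop_cutoff (edges : List (String × String)) (m : Int) :
    ∀ (Qd : List (String × Int)) (f : Nat) (U V : PySem.Set String),
      (∀ e ∈ Qd, ¬ e.2 + 1 ≤ m) → aLoop edges (some m) f U V Qd = U := by
  intro Qd
  induction Qd with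
  | nil => intro f U V _; cases f <;> rfl
  | cons e rest ih =>
    intro f U V h
    obtain ⟨c, l⟩ := e
    cases f with
    | zero => rfl
    | succ f =>
      have hrest : ∀ e ∈ rest, ¬ e.2 + 1 ≤ m := fun e he => h e (List.mem_cons_of_mem _ he)
      have hgt : ¬ l + 1 ≤ m := h (c, l) (by simp)
      have hfix : ∀ (st : PySem.Set String × List (String × Int)),
          edges.foldl (aInner (some m) c l (PySem.Set.add V c)) st = st := by
        intro st
        refine List.foldl_fixed' (fun pc => ?_) edges
        simp [aInner, hgt]
      by_cases hv : PySem.Set.contains V c = true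
      · simp only [aLoop, hv, if_true]
        exact ih f U V hrest
      · simp only [aLoop, hv, Bool.false_eq_true, if_false, hfix]
        exact ih f U _ hrest

-- one visited node: A's scan of all edges = B's scan of the precomputed parent list,
-- with the discovery invariants carried through
lemma inner_corr (edges : List (String × String)) (ml : Option Int) (node_id c : String) (l : Int)
    (V' : PySem.Set String) (S0 : String → Prop) (s0 : PySem.Set String)
    (lvlok : ∀ m, ml = some m → l + 1 ≤ m)
    (hK4 : node_id ∈ V') (hs0 : ∀ x, x ∈ s0 ↔ S0 x) :
    ∀ (es : List (String × String)) (U seen : PySem.Set String) (acc : List (String × Int)) (nxt : List String),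
      (∀ x, x ∈ U ↔ x ∈ seen ∧ x ≠ node_id) →
      (∀ x, x ∈ V' → x ∈ seen) →
      (∀ x, x ∈ seen ↔ S0 x ∨ x ∈ nxt) →
      nxt = ddf s0 (acc.map Prod.fst) →
      (es.foldl (fun st e => if e.2 == c then bIns st e.1 else st) (seen, U, nxt)).2.1
          = (es.foldl (aInner ml c l V') (U, acc)).1
      ∧ (es.foldl (aInner ml c l V') (U, acc)).2
          = acc ++ (es.filter (fun e => e.2 == c && !(PySem.Set.contains V' e.1))).map (fun e => (e.1, l + 1))
      ∧ (∀ x, x ∈ (es.foldl (aInner ml c l V') (U, acc)).1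
            ↔ x ∈ (es.foldl (fun st e => if e.2 == c then bIns st e.1 else st) (seen, U, nxt)).1 ∧ x ≠ node_id)
      ∧ (∀ x, x ∈ (es.foldl (fun st e => if e.2 == c then bIns st e.1 else st) (seen, U, nxt)).1
            ↔ S0 x ∨ x ∈ (es.foldl (fun st e => if e.2 == c then bIns st e.1 else st) (seen, U, nxt)).2.2)
      ∧ (es.foldl (fun st e => if e.2 == c then bIns st e.1 else st) (seen, U, nxt)).2.2
          = ddf s0 ((es.foldl (aInner ml c l V') (U, acc)).2.map Prod.fst) := by
  intro es
  induction es with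
  | nil =>
    intro U seen acc nxt hK2 hK3 hK5 hK6
    exact ⟨rfl, by simp, hK2, hK5, hK6⟩
  | cons e es ih =>
    intro U seen acc nxt hK2 hK3 hK5 hK6
    obtain ⟨p, ch⟩ := e
    simp only [List.foldl_cons, List.filter_cons]
    by_cases hch : (ch == c) = true
    · by_cases hv : p ∈ V'
      · -- parent already visited: both sides skip
        have hA : aInner ml c l V' (U, acc) (p, ch) = (U, acc) := by
          simp [aInner, hv]
        have hB : (if ((p, ch) : String × String).2 == c then bIns (seen, U, nxt) ((p, ch) : String × String).1 else (seen, U, nxt)) = (seen, U, nxt) := by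
          simp [hch, bIns, hK3 p hv]
        rw [hA, hB]
        have hfilt : ((fun e : String × String => e.2 == c && !PySem.Set.contains V' e.1) (p, ch)) = false := by
          simp [hch, hv]
        simp only [hfilt, Bool.false_eq_true, if_false]
        exact ih U seen acc nxt hK2 hK3 hK5 hK6
      · -- fresh parent for A's scan
        have hpn : p ≠ node_id := fun hh => hv (hh ▸ hK4)
        have hA : aInner ml c l V' (U, acc) (p, ch)
            = (PySem.Set.add U p, acc ++ [(p, l + 1)]) := by
          simp only [aInner]
          cases ml with
          | none => simp [hch, hv]
          | some m =>
            have := lvlok m rfl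
            simp [hch, hv]
            omega
        have hfilt : ((fun e : String × String => e.2 == c && !PySem.Set.contains V' e.1) (p, ch)) = true := by
          simp [hch, hv]
        simp only [hfilt, if_true]
        by_cases hp : p ∈ seen
        · -- already discovered: B skips, A's set-add is a no-op
          have hB : (if ((p, ch) : String × String).2 == c then bIns (seen, U, nxt) ((p, ch) : String × String).1 else (seen, U, nxt)) = (seen, U, nxt) := by
            simp [hch, bIns, hp]
          have hpU : p ∈ U := (hK2 p).2 ⟨hp, hpn⟩
          have hUadd : PySem.Set.add U p = U := PySem.Set.add_of_mem hpU
          rw [hA, hB, hUadd]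
          have hK6' : nxt = ddf s0 ((acc ++ [(p, l + 1)]).map Prod.fst) := by
            rw [List.map_append]; simp only [List.map_cons, List.map_nil]; rw [ddf_snoc]
            rw [if_pos]
            · exact hK6
            · rcases (hK5 p).1 hp with h | h
              · exact Or.inl ((hs0 p).2 h)
              · exact Or.inr (hK6 ▸ h)
          obtain ⟨i1, i2, i3, i4, i5⟩ := ih U seen (acc ++ [(p, l + 1)]) nxt hK2 hK3 hK5 hK6'
          refine ⟨i1, ?_, i3, i4, i5⟩
          rw [i2]
          simp
        · -- new discovery: both sides add p
          have hB : (if ((p, ch) : String × String).2 == c then bIns (seen, U, nxt) ((p, ch) : String × String).1 else (seen, U, nxt))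
              = (PySem.Set.add seen p, PySem.Set.add U p, nxt ++ [p]) := by
            simp [hch, bIns, hp]
          rw [hA, hB]
          have hK2' : ∀ x, x ∈ PySem.Set.add U p ↔ x ∈ PySem.Set.add seen p ∧ x ≠ node_id := by
            intro x
            simp only [PySem.Set.mem_add]
            constructor
            · rintro (h | h)
              · exact ⟨Or.inl ((hK2 x).1 h).1, ((hK2 x).1 h).2⟩
              · exact ⟨Or.inr h, h ▸ hpn⟩
            · rintro ⟨h | h, hn⟩
              · exact Or.inl ((hK2 x).2 ⟨h, hn⟩)
              · exact Or.inr h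
          have hK3' : ∀ x, x ∈ V' → x ∈ PySem.Set.add seen p := by
            intro x hx
            rw [PySem.Set.mem_add]
            exact Or.inl (hK3 x hx)
          have hK5' : ∀ x, x ∈ PySem.Set.add seen p ↔ S0 x ∨ x ∈ nxt ++ [p] := by
            intro x
            simp only [PySem.Set.mem_add, List.mem_append, List.mem_singleton, hK5 x]
            tauto
          have hK6' : nxt ++ [p] = ddf s0 ((acc ++ [(p, l + 1)]).map Prod.fst) := by
            rw [List.map_append]; simp only [List.map_cons, List.map_nil]; rw [ddf_snoc]
            rw [if_neg]
            · rw [hK6]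
            · rintro (h | h)
              · exact hp ((hK5 p).2 (Or.inl ((hs0 p).1 h)))
              · exact hp ((hK5 p).2 (Or.inr (hK6 ▸ h)))
          obtain ⟨i1, i2, i3, i4, i5⟩ :=
            ih (PySem.Set.add U p) (PySem.Set.add seen p) (acc ++ [(p, l + 1)]) (nxt ++ [p]) hK2' hK3' hK5' hK6'
          refine ⟨i1, ?_, i3, i4, i5⟩
          rw [i2]
          simp
    · -- an edge into some other node: both sides skip
      have hA : aInner ml c l V' (U, acc) (p, ch) = (U, acc) := by
        simp [aInner, hch]
      have hB : (if ((p, ch) : String × String).2 == c then bIns (seen, U, nxt) ((p, ch) : String × String).1 else (seen, U, nxt)) = (seen, U, nxt) := by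
        simp [hch]
      have hfilt : ((fun e : String × String => e.2 == c && !PySem.Set.contains V' e.1) (p, ch)) = false := by
        simp [hch]
      rw [hA, hB]
      simp only [hfilt, Bool.false_eq_true, if_false]
      exact ih U seen acc nxt hK2 hK3 hK5 hK6

-- one whole level: A's drain of the level segment = B's fold over the frontier
lemma level_corr (edges : List (String × String)) (ml : Option Int) (node_id : String) (d : Int)
    (S0 : String → Prop) (s0 : PySem.Set String)
    (lvlok : ∀ m, ml = some m → d + 1 ≤ m)
    (hs0 : ∀ x, x ∈ s0 ↔ S0 x) :
    ∀ (Qd : List (String × Int)) (U V seen : PySem.Set String) (acc : List (String × Int)) (nxt : List String),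
      (∀ e ∈ Qd, e.2 = d) →
      (∀ x, (x ∈ V ∨ x ∈ ddf V (Qd.map Prod.fst)) ↔ S0 x) →
      (∀ x, x ∈ seen ↔ S0 x ∨ x ∈ nxt) →
      (∀ x, x ∈ U ↔ x ∈ seen ∧ x ≠ node_id) →
      nxt = ddf s0 (acc.map Prod.fst) →
      (node_id ∈ V ∨ ∀ e ∈ Qd, e.1 = node_id) →
      (∀ e ∈ acc, e.2 = d + 1) →
      ((ddf V (Qd.map Prod.fst)).foldl (bNode (bAdj edges)) (seen, U, nxt)).2.1
          = (lvlA edges ml (U, V, acc) Qd).1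
      ∧ (∀ x, x ∈ (lvlA edges ml (U, V, acc) Qd).2.1 ↔ S0 x)
      ∧ (∀ x, x ∈ ((ddf V (Qd.map Prod.fst)).foldl (bNode (bAdj edges)) (seen, U, nxt)).1
            ↔ S0 x ∨ x ∈ ((ddf V (Qd.map Prod.fst)).foldl (bNode (bAdj edges)) (seen, U, nxt)).2.2)
      ∧ (∀ x, x ∈ (lvlA edges ml (U, V, acc) Qd).1
            ↔ x ∈ ((ddf V (Qd.map Prod.fst)).foldl (bNode (bAdj edges)) (seen, U, nxt)).1 ∧ x ≠ node_id)
      ∧ ((ddf V (Qd.map Prod.fst)).foldl (bNode (bAdj edges)) (seen, U, nxt)).2.2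
          = ddf s0 ((lvlA edges ml (U, V, acc) Qd).2.2.map Prod.fst)
      ∧ (∀ e ∈ (lvlA edges ml (U, V, acc) Qd).2.2, e.2 = d + 1)
      ∧ (lvlA edges ml (U, V, acc) Qd).2.2.length + pvF edges (lvlA edges ml (U, V, acc) Qd).2.1
          ≤ acc.length + pvF edges V := by
  intro Qd
  induction Qd with
  | nil =>
    intro U V seen acc nxt hlev hS hseen hU hnxt hnode haccl
    refine ⟨rfl, ?_, hseen, hU, hnxt, haccl, le_refl _⟩
    intro x
    have := hS x
    simpa [ddf] using this
  | cons e rest ih =>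
    intro U V seen acc nxt hlev hS hseen hU hnxt hnode haccl
    obtain ⟨c, lv⟩ := e
    have hlvd : lv = d := hlev (c, lv) (List.mem_cons_self)
    subst hlvd
    simp only [List.map_cons] at hS ⊢
    by_cases hv : c ∈ V
    · have hdd : ddf V (c :: rest.map Prod.fst) = ddf V (rest.map Prod.fst) := by
        simp [ddf, hv]
      have hlvl : lvlA edges ml (U, V, acc) ((c, lv) :: rest) = lvlA edges ml (U, V, acc) rest := by
        simp [lvlA, hv]
      rw [hdd] at hS ⊢
      rw [hlvl]
      exact ih U V seen acc nxt (fun e he => hlev e (List.mem_cons_of_mem _ he)) hS hseen hU hnxt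
        (hnode.imp id (fun h e he => h e (List.mem_cons_of_mem _ he))) haccl
    · have hcontains : PySem.Set.contains V c = false := by
        rw [Bool.eq_false_iff]
        intro hh
        exact hv ((PySem.Set.contains_iff V c).1 hh)
      have hddf : ddf V (c :: rest.map Prod.fst) = c :: ddf (PySem.Set.add V c) (rest.map Prod.fst) := by
        simp [ddf, hv]
      rw [hddf] at hS ⊢
      have hK4' : node_id ∈ PySem.Set.add V c := by
        rw [PySem.Set.mem_add]
        rcases hnode with h | h
        · exact Or.inl h
        · exact Or.inr (h (c, lv) (List.mem_cons_self)).symm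
      have hK3' : ∀ x, x ∈ PySem.Set.add V c → x ∈ seen := by
        intro x hx
        rcases (PySem.Set.mem_add _ _ _).1 hx with h | h
        · exact (hseen x).2 (Or.inl ((hS x).1 (Or.inl h)))
        · refine (hseen x).2 (Or.inl ((hS x).1 (Or.inr ?_)))
          rw [h]
          exact List.mem_cons_self
      obtain ⟨j1, j2, j3, j4, j5⟩ :=
        inner_corr edges ml node_id c lv (PySem.Set.add V c) S0 s0 lvlok hK4' hs0 edges
          U seen acc nxt hU hK3' hseen hnxt
      have hlvl : lvlA edges ml (U, V, acc) ((c, lv) :: rest)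
          = lvlA edges ml ((edges.foldl (aInner ml c lv (PySem.Set.add V c)) (U, acc)).1,
              PySem.Set.add V c, (edges.foldl (aInner ml c lv (PySem.Set.add V c)) (U, acc)).2) rest := by
        simp [lvlA, hv]
      have hbn : bNode (bAdj edges) (seen, U, nxt) c
          = ((edges.foldl (fun st e => if e.2 == c then bIns st e.1 else st) (seen, U, nxt)).1,
             (edges.foldl (aInner ml c lv (PySem.Set.add V c)) (U, acc)).1,
             (edges.foldl (fun st e => if e.2 == c then bIns st e.1 else st) (seen, U, nxt)).2.2) := by
        rw [bNode_eq, ← j1]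
      have hS' : ∀ x, (x ∈ PySem.Set.add V c ∨ x ∈ ddf (PySem.Set.add V c) (rest.map Prod.fst)) ↔ S0 x := by
        intro x
        rw [← hS x]
        simp only [PySem.Set.mem_add, List.mem_cons]
        tauto
      have haccl' : ∀ e ∈ (edges.foldl (aInner ml c lv (PySem.Set.add V c)) (U, acc)).2, e.2 = lv + 1 := by
        rw [j2]
        intro e he
        rcases List.mem_append.1 he with h | h
        · exact haccl e h
        · obtain ⟨e', _, rfl⟩ := List.mem_map.1 h
          rfl
      obtain ⟨k1, k2, k3, k4, k5, k6, k7⟩ :=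
        ih (edges.foldl (aInner ml c lv (PySem.Set.add V c)) (U, acc)).1 (PySem.Set.add V c)
          (edges.foldl (fun st e => if e.2 == c then bIns st e.1 else st) (seen, U, nxt)).1
          (edges.foldl (aInner ml c lv (PySem.Set.add V c)) (U, acc)).2
          (edges.foldl (fun st e => if e.2 == c then bIns st e.1 else st) (seen, U, nxt)).2.2
          (fun e he => hlev e (List.mem_cons_of_mem _ he)) hS' j4 j3 j5 (Or.inl hK4') haccl'
      have hlen : (edges.foldl (aInner ml c lv (PySem.Set.add V c)) (U, acc)).2.length
            + pvF edges (PySem.Set.add V c) ≤ acc.length + pvF edges V := by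
        rw [j2, pvF_add edges V c hv]
        have hmono : (edges.filter (fun e => e.2 == c && !(PySem.Set.contains (PySem.Set.add V c) e.1))).length
            ≤ edges.countP (fun e => e.2 == c) := by
          rw [← List.countP_eq_length_filter]
          exact List.countP_mono_left (fun e _ h => by
            simp only [Bool.and_eq_true] at h
            exact h.1)
        simp only [List.length_append, List.length_map]
        omega
      rw [List.foldl_cons, hbn, hlvl]
      exact ⟨k1, k2, k3, k4, k5, k6, le_trans k7 hlen⟩

-- one full level of the correspondence, packaged (ih is the outer induction hypothesis)
lemma level_step (edges : List (String × String)) (ml : Option Int) (node_id : String)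
    (g f : Nat) (d : Int) (U V seen : PySem.Set String) (Qd : List (String × Int)) (v : String) (fr : List String)
    (hlev : ∀ e ∈ Qd, e.2 = d)
    (hseen : ∀ x, x ∈ seen ↔ (x ∈ V ∨ x ∈ ddf V (Qd.map Prod.fst)))
    (hU : ∀ x, x ∈ U ↔ x ∈ seen ∧ x ≠ node_id)
    (hnode : node_id ∈ V ∨ ∀ e ∈ Qd, e.1 = node_id)
    (hf : Qd.length + pvF edges V ≤ f)
    (hg : (ddf V (Qd.map Prod.fst)).length + pvF edges V ≤ g + 1)
    (hfr : ddf V (Qd.map Prod.fst) = v :: fr)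
    (hcut' : (match ml with | none => false | some m => decide (¬ d < m)) = false)
    (lvlok : ∀ m, ml = some m → d + 1 ≤ m)
    (ihg : ∀ (f : Nat) (d : Int) (U V seen : PySem.Set String) (Qd : List (String × Int)),
      (∀ e ∈ Qd, e.2 = d) →
      (∀ x, x ∈ seen ↔ (x ∈ V ∨ x ∈ ddf V (Qd.map Prod.fst))) →
      (∀ x, x ∈ U ↔ x ∈ seen ∧ x ≠ node_id) →
      (node_id ∈ V ∨ ∀ e ∈ Qd, e.1 = node_id) →
      Qd.length + pvF edges V ≤ f →
      (ddf V (Qd.map Prod.fst)).length + pvF edges V ≤ g →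
      aLoop edges ml f U V Qd = bLoop (bAdj edges) ml g d seen U (ddf V (Qd.map Prod.fst))) :
    aLoop edges ml f U V Qd = bLoop (bAdj edges) ml (g + 1) d seen U (v :: fr) := by
  obtain ⟨k1, k2, k3, k4, k5, k6, k7⟩ :=
    level_corr edges ml node_id d (fun x => x ∈ seen) seen lvlok (fun x => Iff.rfl)
      Qd U V seen [] [] hlev (fun x => (hseen x).symm)
      (fun x => by simp) hU rfl hnode (by simp)
  have hfsplit : Qd.length + (f - Qd.length) = f := by omega
  have hA := aLoop_level edges ml Qd (f - Qd.length) U V []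
  rw [List.append_nil] at hA
  rw [← hfsplit, hA]
  have hBstep : bLoop (bAdj edges) ml (g + 1) d seen U (v :: fr)
      = bLoop (bAdj edges) ml g (d + 1)
          ((v :: fr).foldl (bNode (bAdj edges)) (seen, U, [])).1
          ((v :: fr).foldl (bNode (bAdj edges)) (seen, U, [])).2.1
          ((v :: fr).foldl (bNode (bAdj edges)) (seen, U, [])).2.2 := by
    simp only [bLoop]
    split
    · simp
    · rename_i m0 mval
      have hdm := lvlok mval rfl
      rw [if_neg (by simp; omega)]
  rw [hBstep, ← hfr]
  have hdd2 : ddf (lvlA edges ml (U, V, []) Qd).2.1 ((lvlA edges ml (U, V, []) Qd).2.2.map Prod.fst)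
      = ((ddf V (Qd.map Prod.fst)).foldl (bNode (bAdj edges)) (seen, U, [])).2.2 := by
    rw [k5]
    exact ddf_congr _ seen (fun x => k2 x) _
  have hnodeV' : node_id ∈ (lvlA edges ml (U, V, []) Qd).2.1 := by
    refine (k2 node_id).2 ?_
    rcases hnode with h | h
    · exact (hseen node_id).2 (Or.inl h)
    · have hvQ : v ∈ Qd.map Prod.fst :=
        ddf_subset V (Qd.map Prod.fst) v (by rw [hfr]; exact List.mem_cons_self)
      obtain ⟨e, he, hev⟩ := List.mem_map.1 hvQ
      have : v = node_id := hev ▸ h e he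
      refine (hseen node_id).2 (Or.inr ?_)
      rw [← this, hfr]
      exact List.mem_cons_self
  have hseen' : ∀ x, x ∈ ((ddf V (Qd.map Prod.fst)).foldl (bNode (bAdj edges)) (seen, U, [])).1
      ↔ (x ∈ (lvlA edges ml (U, V, []) Qd).2.1
         ∨ x ∈ ddf (lvlA edges ml (U, V, []) Qd).2.1 ((lvlA edges ml (U, V, []) Qd).2.2.map Prod.fst)) := by
    intro x
    rw [hdd2, k3 x]
    exact or_congr (k2 x).symm Iff.rfl
  have hf' : (lvlA edges ml (U, V, []) Qd).2.2.length + pvF edges (lvlA edges ml (U, V, []) Qd).2.1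
      ≤ f - Qd.length := by
    have := k7
    simp only [List.length_nil] at this
    omega
  have hg' : (ddf (lvlA edges ml (U, V, []) Qd).2.1 ((lvlA edges ml (U, V, []) Qd).2.2.map Prod.fst)).length
      + pvF edges (lvlA edges ml (U, V, []) Qd).2.1 ≤ g := by
    have h1 : (ddf (lvlA edges ml (U, V, []) Qd).2.1 ((lvlA edges ml (U, V, []) Qd).2.2.map Prod.fst)).length
        ≤ (lvlA edges ml (U, V, []) Qd).2.2.length := by
      have := ddf_length_le (lvlA edges ml (U, V, []) Qd).2.1 ((lvlA edges ml (U, V, []) Qd).2.2.map Prod.fst)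
      simpa using this
    have h2 := k7
    simp only [List.length_nil] at h2
    have h3 : (v :: fr).length + pvF edges V ≤ g + 1 := by rw [← hfr]; exact hg
    simp only [List.length_cons] at h3
    omega
  have := ihg (f - Qd.length) (d + 1) (lvlA edges ml (U, V, []) Qd).1
      (lvlA edges ml (U, V, []) Qd).2.1
      ((ddf V (Qd.map Prod.fst)).foldl (bNode (bAdj edges)) (seen, U, [])).1
      (lvlA edges ml (U, V, []) Qd).2.2
      k6 hseen' k4 (Or.inl hnodeV') hf' hg'
  rw [this, k1, hdd2]

-- the two loops agree, level by level
lemma main_corr (edges : List (String × String)) (ml : Option Int) (node_id : String) :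
    ∀ (g : Nat) (f : Nat) (d : Int) (U V seen : PySem.Set String) (Qd : List (String × Int)),
      (∀ e ∈ Qd, e.2 = d) →
      (∀ x, x ∈ seen ↔ (x ∈ V ∨ x ∈ ddf V (Qd.map Prod.fst))) →
      (∀ x, x ∈ U ↔ x ∈ seen ∧ x ≠ node_id) →
      (node_id ∈ V ∨ ∀ e ∈ Qd, e.1 = node_id) →
      Qd.length + pvF edges V ≤ f →
      (ddf V (Qd.map Prod.fst)).length + pvF edges V ≤ g →
      aLoop edges ml f U V Qd = bLoop (bAdj edges) ml g d seen U (ddf V (Qd.map Prod.fst)) := by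
  intro g
  induction g with
  | zero =>
    intro f d U V seen Qd hlev hseen hU hnode hf hg
    have hfr : ddf V (Qd.map Prod.fst) = [] := by
      cases h : ddf V (Qd.map Prod.fst) with
      | nil => rfl
      | cons a l => rw [h] at hg; simp at hg
    have hvis : ∀ e ∈ Qd, e.1 ∈ V := fun e he =>
      ddf_eq_nil V (Qd.map Prod.fst) hfr e.1 (List.mem_map_of_mem he)
    rw [aLoop_skip_all edges ml Qd f U V hvis, hfr]
    rfl
  | succ g ihg =>
    intro f d U V seen Qd hlev hseen hU hnode hf hg
    cases hfr : ddf V (Qd.map Prod.fst) with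
    | nil =>
      have hvis : ∀ e ∈ Qd, e.1 ∈ V := fun e he =>
        ddf_eq_nil V (Qd.map Prod.fst) hfr e.1 (List.mem_map_of_mem he)
      rw [aLoop_skip_all edges ml Qd f U V hvis]
      rfl
    | cons v fr =>
      cases hml : ml with
      | none =>
        rw [hml] at ihg
        exact level_step edges none node_id g f d U V seen Qd v fr hlev hseen hU hnode hf
          (hfr ▸ hg) hfr rfl (fun m hm => by cases hm) ihg
      | some m =>
        rw [hml] at ihg
        by_cases hdm : d < m
        · exact level_step edges (some m) node_id g f d U V seen Qd v fr hlev hseen hU hnode hf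
            (hfr ▸ hg) hfr (by simp [hdm]) (fun m' hm' => by injection hm' with h; omega) ihg
        · -- cut off at max_level: A drains its queue without effect, B stops
          have hAcut : aLoop edges (some m) f U V Qd = U := by
            apply aLoop_cutoff
            intro e he
            rw [hlev e he]
            omega
          rw [hAcut]
          simp only [bLoop]
          rw [if_pos (by simpa using hdm)]

-- ===== VERDICT (by name: the statement is the Claim_ definition above) =====
theorem collect_upstream_deps_spec : Claim_equal_collect_upstream_deps := by
  intro node_id edges nodes max_level _
  unfold Spec_collect_upstream_deps collect_upstream_deps collect_upstream_deps_alt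
  have h0 : ddf PySem.Set.empty ([((node_id : String), (0 : Int))].map Prod.fst) = [node_id] := by
    simp [ddf, PySem.Set.contains, PySem.Set.empty, PySem.Set.add]
  have hF : pvF edges PySem.Set.empty = edges.length := by
    simp [pvF, PySem.Set.contains, PySem.Set.empty]
  have hseen0 : PySem.Set.add PySem.Set.empty node_id = [node_id] := by
    simp [PySem.Set.add, PySem.Set.empty]
  have hmain := main_corr edges max_level node_id (pvFuel edges) (pvFuel edges) 0
      PySem.Set.empty PySem.Set.empty (PySem.Set.add PySem.Set.empty node_id)
      [(node_id, 0)]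
      (by simp)
      (by
        intro x
        rw [h0, hseen0]
        simp [PySem.Set.empty])
      (by
        intro x
        rw [hseen0]
        simp [PySem.Set.empty])
      (Or.inr (by simp))
      (by
        rw [hF]
        simp only [pvFuel, List.length_cons, List.length_nil]
        omega)
      (by
        rw [hF, h0]
        simp only [pvFuel, List.length_cons, List.length_nil]
        omega)
  rw [hmain, h0]
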